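-- pv_equiv track=rewrite | github.com/vgnshiyer/Data-Structures-and-Algorithm-Solutions | Interview Questions/DRW/minimumAccountBalance.py | solution
-- ===== SOURCE A (Python) =====
-- def solution(R, V):
--     A = B = 0
--     Amin = Bmin = 0
--     for i, amount in enumerate(V):
--         receiver = R[i]
--
--         if receiver == 'B':
--             B += amount
--             A -= amount
--             Amin = min(Amin, A)
--         else:
--             A += amount
--             B -= amount
--             Bmin = min(Bmin, B)
--
--     return [abs(Amin), abs(Bmin)]
-- ===== SOURCE B (Python) =====
-- def solution(R, V):
--     # Divide and conquer: each segment of transactions is summarized as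
--     # (total signed delta to A's balance, min A-balance at 'B'-steps, max A-balance at other steps),
--     # relative to the segment start; summaries merge associatively by shifting the
--     # right half's extrema by the left half's total.
--     def merge(left, right):
--         t1, m1, M1 = left
--         t2, m2, M2 = right
--         m2 = None if m2 is None else t1 + m2
--         M2 = None if M2 is None else t1 + M2
--         m = m1 if m2 is None else (m2 if m1 is None else min(m1, m2))
--         M = M1 if M2 is None else (M2 if M1 is None else max(M1, M2))
--         return (t1 + t2, m, M)
--
--     def seg(i, j):
--         if j - i == 1:
--             if R[i] == 'B':
--                 return (-V[i], -V[i], None)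
--             return (V[i], None, V[i])
--         mid = (i + j) // 2
--         return merge(seg(i, mid), seg(mid, j))
--
--     if not V:
--         return [0, 0]
--     _, m, M = seg(0, len(V))
--     lo = min(0, m) if m is not None else 0
--     hi = max(0, M) if M is not None else 0
--     return [-lo, hi]
-- ===== Notes on version B (the rewrite author's own statement) =====
-- stated objective: alternative
-- what changed: B replaces A's linear four-variable scan by a divide-and-conquer over the transaction index range: each half is summarized as (total delta, min 'B'-step balance, max other-step balance) and summaries are merged by shifting the right half's extrema by the left half's total.
import Mathlib
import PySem

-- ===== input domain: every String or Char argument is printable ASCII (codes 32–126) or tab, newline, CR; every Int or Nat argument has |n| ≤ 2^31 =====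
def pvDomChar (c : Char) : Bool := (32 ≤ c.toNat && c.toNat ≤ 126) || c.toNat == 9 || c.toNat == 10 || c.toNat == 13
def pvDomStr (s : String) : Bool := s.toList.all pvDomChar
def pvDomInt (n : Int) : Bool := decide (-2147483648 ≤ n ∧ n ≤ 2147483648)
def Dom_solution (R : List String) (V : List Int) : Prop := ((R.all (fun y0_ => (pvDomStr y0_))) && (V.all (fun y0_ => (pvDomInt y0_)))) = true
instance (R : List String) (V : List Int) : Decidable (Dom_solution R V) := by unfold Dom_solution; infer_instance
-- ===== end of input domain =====

-- B replaces A's linear four-variable scan by a divide-and-conquer over the index range,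
-- merging (total delta, min 'B'-step balance, max other-step balance) summaries (objective: alternative).

-- ===== PORT A =====
-- one loop step: state (A, B, Amin, Bmin), item (i, amount); R[i] is pyGet?;
-- the .getD "" default is never reached under Pre_solution (Python raises IndexError there)
def solStep (R : List String) (st : Int × Int × Int × Int) (p : Int × Int) : Int × Int × Int × Int :=
  let receiver := (PySem.List.pyGet? R p.1).getD ""
  if receiver == "B" then
    (st.1 - p.2, st.2.1 + p.2, min st.2.2.1 (st.1 - p.2), st.2.2.2)
  else
    (st.1 + p.2, st.2.1 - p.2, st.2.2.1, min st.2.2.2 (st.2.1 - p.2))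

def solution (R : List String) (V : List Int) : List Int :=
  let st := (PySem.List.enumerate V 0).foldl (solStep R) (0, 0, 0, 0)
  [|st.2.2.1|, |st.2.2.2|]

-- ===== PORT B =====
-- Python's merge(left, right): shift the right summary's extrema by the left total, combine
def segMerge (l r : Int × Option Int × Option Int) : Int × Option Int × Option Int :=
  let m2 := r.2.1.map (l.1 + ·)
  let M2 := r.2.2.map (l.1 + ·)
  let m := match m2 with
    | none => l.2.1
    | some y => match l.2.1 with | none => some y | some x => some (min x y)
  let M := match M2 with
    | none => l.2.2
    | some y => match l.2.2 with | none => some y | some x => some (max x y)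
  (l.1 + r.1, m, M)

-- Python's seg(i, j); the leaf test `j - i == 1` is written `j - i ≤ 1` only to make the
-- (never reached, since seg is always called with i < j) case j ≤ i total; same values everywhere.
-- The .getD defaults are never reached under Pre_solution (Python raises IndexError there).
def segB (R : List String) (V : List Int) (i j : Nat) : Int × Option Int × Option Int :=
  if j - i ≤ 1 then
    let r := (PySem.List.pyGet? R (i : Int)).getD ""
    let v := (PySem.List.pyGet? V (i : Int)).getD 0
    if r == "B" then (-v, some (-v), none) else (v, none, some v)
  else
    segMerge (segB R V i ((i + j) / 2)) (segB R V ((i + j) / 2) j)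
termination_by j - i
decreasing_by all_goals omega

def solution_alt (R : List String) (V : List Int) : List Int :=
  if V = [] then [0, 0]
  else
    let s := segB R V 0 V.length
    let lo := match s.2.1 with | some m => min 0 m | none => (0 : Int)
    let hi := match s.2.2 with | some M => max 0 M | none => (0 : Int)
    [-lo, hi]

-- ===== PRECONDITION & SPEC =====
-- Pre_: A raises IndexError (R[i]) when V is longer than R; exactly those inputs are excluded.
def Pre_solution (R : List String) (V : List Int) : Prop := V.length ≤ R.length
instance (R : List String) (V : List Int) : Decidable (Pre_solution R V) := by unfold Pre_solution; infer_instance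
def pvWitness_solution : List String × List Int := (["B", "A"], [3, -2])

def Spec_solution (R : List String) (V : List Int) (out : List Int) : Prop := out = solution_alt R V
instance (R : List String) (V : List Int) (out : List Int) : Decidable (Spec_solution R V out) := by unfold Spec_solution; infer_instance

-- ===== CLAIM (what is proved, stated in full; the proofs are below) =====
def Claim_equal_solution : Prop := ∀ (R : List String) (V : List Int), Dom_solution R V → Pre_solution R V → Spec_solution R V (solution R V)

-- ===== LEMMAS AND PROOFS =====

-- A's loop, rewritten as structural recursion on the (receiver, amount) pairs
def aGo : List (String × Int) → Int → Int → Int → Int → List Int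
  | [], _, _, Amin, Bmin => [|Amin|, |Bmin|]
  | (r, v) :: t, A, B, Amin, Bmin =>
      if r == "B" then aGo t (A - v) (B + v) (min Amin (A - v)) Bmin
      else aGo t (A + v) (B - v) Amin (min Bmin (B - v))

-- bridge: A's foldl over enumerate-from-k with R[i] equals aGo on (R.drop k).zip V
theorem bridge (V : List Int) : ∀ (R : List String) (k : Nat), k + V.length ≤ R.length →
    ∀ (A B Amin Bmin : Int),
      (let st := (PySem.List.enumerate V (k : Int)).foldl (solStep R) (A, B, Amin, Bmin)
       [|st.2.2.1|, |st.2.2.2|]) = aGo ((R.drop k).zip V) A B Amin Bmin := by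
  induction V with
  | nil => intro R k _ A B Amin Bmin; simp [PySem.List.enumerate_nil, aGo]
  | cons v t ih =>
      intro R k hk A B Amin Bmin
      have hkR : k < R.length := by simp at hk; omega
      have hdrop : R.drop k = R[k] :: R.drop (k + 1) := List.drop_eq_getElem_cons hkR
      have hget : PySem.List.pyGet? R (k : Int) = some R[k] := by
        simp [PySem.List.pyGet?_natCast, List.getElem?_eq_getElem hkR]
      have hstep : ∀ st : Int × Int × Int × Int, solStep R st ((k : Int), v) =
          (if R[k] == "B" then (st.1 - v, st.2.1 + v, min st.2.2.1 (st.1 - v), st.2.2.2)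
           else (st.1 + v, st.2.1 - v, st.2.2.1, min st.2.2.2 (st.2.1 - v))) := by
        intro st; simp [solStep, hget]
      rw [PySem.List.enumerate_cons]
      simp only [List.foldl_cons, hstep, hdrop, List.zip_cons_cons, aGo]
      have hk' : (k + 1) + t.length ≤ R.length := by simp at hk; omega
      by_cases hB : R[k] == "B"
      · simpa [hB] using ih R (k + 1) hk' (A - v) (B + v) (min Amin (A - v)) Bmin
      · simpa [hB] using ih R (k + 1) hk' (A + v) (B - v) Amin (min Bmin (B - v))

-- linear specifications of the three summary components
def delta (p : String × Int) : Int := if p.1 == "B" then -p.2 else p.2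

def tot : List (String × Int) → Int
  | [] => 0
  | p :: t => delta p + tot t

def cmin : Option Int → Option Int → Option Int
  | a, none => a
  | none, some y => some y
  | some x, some y => some (min x y)

def cmax : Option Int → Option Int → Option Int
  | a, none => a
  | none, some y => some y
  | some x, some y => some (max x y)

def loL : List (String × Int) → Option Int
  | [] => none
  | p :: t => cmin (if p.1 == "B" then some (delta p) else none) ((loL t).map (delta p + ·))

def hiL : List (String × Int) → Option Int
  | [] => none
  | p :: t => cmax (if p.1 == "B" then none else some (delta p)) ((hiL t).map (delta p + ·))

theorem map_map_add (o : Option Int) (a b : Int) :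
    (o.map (a + ·)).map (b + ·) = o.map ((b + a) + ·) := by
  cases o <;> simp; ring

theorem cmin_map (x y : Option Int) (d : Int) :
    (cmin x y).map (d + ·) = cmin (x.map (d + ·)) (y.map (d + ·)) := by
  cases x <;> cases y <;> simp [cmin] <;> omega

theorem cmax_map (x y : Option Int) (d : Int) :
    (cmax x y).map (d + ·) = cmax (x.map (d + ·)) (y.map (d + ·)) := by
  cases x <;> cases y <;> simp [cmax] <;> omega

theorem cmin_assoc (x y z : Option Int) : cmin (cmin x y) z = cmin x (cmin y z) := by
  cases x <;> cases y <;> cases z <;> simp [cmin] <;> omega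

theorem cmax_assoc (x y z : Option Int) : cmax (cmax x y) z = cmax x (cmax y z) := by
  cases x <;> cases y <;> cases z <;> simp [cmax] <;> omega

theorem tot_append (a b : List (String × Int)) : tot (a ++ b) = tot a + tot b := by
  induction a with
  | nil => simp [tot]
  | cons p t ih => simp [tot, ih]; ring

theorem loL_append (a b : List (String × Int)) :
    loL (a ++ b) = cmin (loL a) ((loL b).map (tot a + ·)) := by
  induction a with
  | nil => simp only [List.nil_append, loL, tot]; cases h : loL b <;> simp [cmin, h]
  | cons p t ih =>
      simp only [List.cons_append, loL, ih, cmin_map, map_map_add, cmin_assoc, tot]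

theorem hiL_append (a b : List (String × Int)) :
    hiL (a ++ b) = cmax (hiL a) ((hiL b).map (tot a + ·)) := by
  induction a with
  | nil => simp only [List.nil_append, hiL, tot]; cases h : hiL b <;> simp [cmax, h]
  | cons p t ih =>
      simp only [List.cons_append, hiL, ih, cmax_map, map_map_add, cmax_assoc, tot]

theorem segMerge_spec (a b : List (String × Int)) :
    segMerge (tot a, loL a, hiL a) (tot b, loL b, hiL b) =
      (tot (a ++ b), loL (a ++ b), hiL (a ++ b)) := by
  rw [tot_append, loL_append, hiL_append]
  cases h1 : loL a <;> cases h2 : (loL b).map (tot a + ·) <;>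
    cases h3 : hiL a <;> cases h4 : (hiL b).map (tot a + ·) <;>
    simp [segMerge, cmin, cmax, h1, h2, h3, h4]

-- segB computes the linear summaries of the segment (R.zip V)[i:j]
theorem segB_spec (R : List String) (V : List Int) (hRV : V.length ≤ R.length) :
    ∀ (n i j : Nat), j - i ≤ n → i < j → j ≤ V.length →
      segB R V i j =
        (tot (((R.zip V).drop i).take (j - i)),
         loL (((R.zip V).drop i).take (j - i)),
         hiL (((R.zip V).drop i).take (j - i))) := by
  intro n
  induction n with
  | zero => intro i j h hij _; omega
  | succ n ih =>
      intro i j hn hij hj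
      rw [segB]
      by_cases hle : j - i ≤ 1
      · have hj1 : j = i + 1 := by omega
        subst hj1
        have hiV : i < V.length := by omega
        have hiR : i < R.length := by omega
        have hiz : i < (R.zip V).length := by simp [List.length_zip]; omega
        have hdrop : (R.zip V).drop i = (R.zip V)[i] :: (R.zip V).drop (i + 1) :=
          List.drop_eq_getElem_cons hiz
        have hzi : (R.zip V)[i] = (R[i], V[i]) := List.getElem_zip
        have hgR : PySem.List.pyGet? R (i : Int) = some R[i] := by
          simp [PySem.List.pyGet?_natCast, List.getElem?_eq_getElem hiR]
        have hgV : PySem.List.pyGet? V (i : Int) = some V[i] := by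
          simp [PySem.List.pyGet?_natCast, List.getElem?_eq_getElem hiV]
        have htk : i + 1 - i = 1 := by omega
        rw [htk, hdrop, hzi]
        by_cases hB : R[i] == "B" <;>
          simp [hle, hgR, hgV, hB, tot, loL, hiL, cmin, cmax, delta]
      · have hij2 : i + 2 ≤ j := by omega
        have hmid1 : i < (i + j) / 2 := by omega
        have hmid2 : (i + j) / 2 < j := by omega
        rw [if_neg hle,
            ih i ((i + j) / 2) (by omega) hmid1 (by omega),
            ih ((i + j) / 2) j (by omega) hmid2 hj]
        have hsplit :
            ((R.zip V).drop i).take (j - i) =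
              ((R.zip V).drop i).take ((i + j) / 2 - i) ++
              ((R.zip V).drop ((i + j) / 2)).take (j - (i + j) / 2) := by
          have h1 : j - i = ((i + j) / 2 - i) + (j - (i + j) / 2) := by omega
          have h2 : ((R.zip V).drop i).drop ((i + j) / 2 - i) = (R.zip V).drop ((i + j) / 2) := by
            rw [List.drop_drop]; congr 1; omega
          rw [h1, List.take_add, h2]
        rw [hsplit, segMerge_spec]

-- aGo with B = -A, expressed through the linear summaries
theorem aGo_spec (l : List (String × Int)) : ∀ (A Amin Bmin : Int),
    aGo l A (-A) Amin Bmin =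
      [|(loL l).elim Amin (fun m => min Amin (A + m))|,
       |(hiL l).elim Bmin (fun M => min Bmin (-(A + M)))|] := by
  induction l with
  | nil => intro A Amin Bmin; simp [aGo, loL, hiL]
  | cons p t ih =>
      intro A Amin Bmin
      obtain ⟨r, v⟩ := p
      by_cases hB : r == "B"
      · have hd : delta (r, v) = -v := by simp [delta, hB]
        have hneg : -A + v = -(A - v) := by ring
        simp only [aGo, hB, if_true, hneg, ih (A - v) (min Amin (A - v)) Bmin,
          loL, hiL, hd, hB, cmin, cmax]
        cases h1 : loL t <;> cases h2 : hiL t <;>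
          simp [cmin, cmax] <;> (try constructor) <;> (congr 1 <;> omega)
      · have hd : delta (r, v) = v := by simp [delta, hB]
        have hneg : -A - v = -(A + v) := by ring
        simp only [aGo, hB, if_false, hneg, ih (A + v) Amin (min Bmin (-(A + v))),
          loL, hiL, hd, hB, cmin, cmax]
        cases h1 : loL t <;> cases h2 : hiL t <;>
          simp [cmin, cmax] <;> (try constructor) <;> (congr 1 <;> omega)

-- ===== VERDICT (by name: the statement is the Claim_ definition above) =====
theorem solution_spec : Claim_equal_solution := by
  intro R V _ hpre
  unfold Spec_solution
  have h0 : (0 : Nat) + V.length ≤ R.length := by simpa using hpre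
  have hb := bridge V R 0 h0 0 0 0 0
  simp only [Nat.cast_zero, List.drop_zero] at hb
  show solution R V = solution_alt R V
  unfold solution solution_alt
  rw [hb]
  by_cases hV : V = []
  · subst hV; simp [aGo]
  · rw [if_neg hV]
    have hlen : 0 < V.length := List.length_pos_iff.mpr hV
    have hzlen : (R.zip V).length = V.length := by simp [List.length_zip]; omega
    have hseg := segB_spec R V hpre V.length 0 V.length (by omega) hlen (le_refl _)
    have hfull : (((R.zip V)).drop 0).take (V.length - 0) = R.zip V := by
      simp [List.take_of_length_le, hzlen.le]
    rw [hfull] at hseg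
    rw [hseg]
    have := aGo_spec (R.zip V) 0 0 0
    rw [neg_zero] at this
    rw [this]
    have e2 : ∀ M : Int, |min 0 (-(0 + M))| = max 0 M := by
      intro M
      have h : min (0 : Int) (-(0 + M)) = -(max 0 M) := by omega
      rw [h, abs_neg, abs_of_nonneg (le_max_left _ _)]
    have e1 : ∀ m : Int, |min 0 m| = -(min 0 m) := fun m => abs_of_nonpos (min_le_left _ _)
    have e3 : ∀ M : Int, -min 0 (-M) = max 0 M := by
      intro M
      rcases le_total M 0 with h | h
      · rw [min_eq_left (by omega), max_eq_left h]; ring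
      · rw [min_eq_right (by omega), max_eq_right h]; ring
    cases h1 : loL (R.zip V) <;> cases h2 : hiL (R.zip V) <;>
      simp only [Option.elim, e2, e1, zero_add, abs_zero, neg_zero] <;> simp <;>
      (try exact e3 _)
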